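-- pv_equiv track=rewrite | github.com/pinjamar/python_tasks_collection | algebra/09_maskiranje_kreditne_kartice.py | sakrij_znakove
-- ===== SOURCE A (Python) =====
-- def sakrij_znakove(tekst):
--     zasticeni_tekst = ''
--     if len(tekst) <= 5:
--         return f'Tekst {tekst} ima 5 ili manje znakova!'
--     else:
--         brojac = 0
--         for znak in tekst[ : : -1]:
--             if znak != '-' and brojac < 4:
--                 zasticeni_tekst += znak
--                 brojac += 1
--             elif znak != '-' and brojac >= 4:
--                 zasticeni_tekst += '#'
--             else:
--                 zasticeni_tekst += znak
--
--         return zasticeni_tekst[ : : -1]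
-- ===== SOURCE B (Python) =====
-- def sakrij_znakove(tekst):
--     if len(tekst) <= 5:
--         return f'Tekst {tekst} ima 5 ili manje znakova!'
--     pos = [i for i, ch in enumerate(tekst) if ch != '-']
--     cut = pos[-4] if len(pos) >= 4 else 0
--     return ''.join('#' if ch != '-' else ch for ch in tekst[:cut]) + tekst[cut:]
-- ===== Notes on version B (the rewrite author's own statement) =====
-- stated objective: alternative
-- what changed: B locates the index of the 4th-from-last non-dash character (via an enumerate/filter position list), then splits the string there: mask every non-dash character of the prefix with a plain map and append the suffix verbatim, instead of A's reverse / capped-counter state machine / reverse-back.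
import Mathlib
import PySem

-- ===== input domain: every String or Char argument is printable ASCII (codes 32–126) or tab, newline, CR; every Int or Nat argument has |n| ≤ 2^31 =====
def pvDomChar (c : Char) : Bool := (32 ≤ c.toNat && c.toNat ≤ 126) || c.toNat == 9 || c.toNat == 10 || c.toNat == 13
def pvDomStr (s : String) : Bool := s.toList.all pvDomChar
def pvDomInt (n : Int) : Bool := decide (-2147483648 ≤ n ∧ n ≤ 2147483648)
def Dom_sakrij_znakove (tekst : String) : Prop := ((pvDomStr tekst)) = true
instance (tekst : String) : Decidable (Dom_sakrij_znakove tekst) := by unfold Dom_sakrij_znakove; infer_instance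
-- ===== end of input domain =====

-- B finds the index of the 4th-from-last non-dash character and splits there (mask the
-- whole prefix by a map, keep the suffix verbatim) instead of A's reverse/counter/reverse
-- (objective: alternative); same value everywhere.

-- ===== PORT A =====
-- the loop body of A: zasticeni_tekst/brojac as the fold state
def pvStepA (st : List Char × Int) (znak : Char) : List Char × Int :=
  if znak ≠ '-' ∧ st.2 < 4 then (st.1 ++ [znak], st.2 + 1)
  else if znak ≠ '-' ∧ st.2 ≥ 4 then (st.1 ++ ['#'], st.2)
  else (st.1 ++ [znak], st.2)

def sakrij_znakove (tekst : String) : String :=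
  if PySem.Str.len tekst ≤ 5 then
    -- f'Tekst {tekst} ima 5 ili manje znakova!'
    String.ofList ("Tekst ".toList ++ tekst.toList ++ " ima 5 ili manje znakova!".toList)
  else
    -- tekst[::-1] is .reverse (PySem.List.slice?_none_none_neg_one); zasticeni_tekst[::-1] is the final .reverse
    String.ofList ((tekst.toList.reverse).foldl pvStepA ([], 0)).1.reverse

-- ===== PORT B =====
-- pos = [i for i, ch in enumerate(tekst) if ch != '-']
def pvPositions (l : List Char) (s : Int) : List Int :=
  ((PySem.List.enumerate l s).filter (fun p => p.2 != '-')).map Prod.fst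

def sakrij_znakove_alt (tekst : String) : String :=
  if PySem.Str.len tekst ≤ 5 then
    String.ofList ("Tekst ".toList ++ tekst.toList ++ " ima 5 ili manje znakova!".toList)
  else
    let l := tekst.toList
    let pos := pvPositions l 0
    -- cut = pos[-4] if len(pos) >= 4 else 0
    let cut : Int := if 4 ≤ pos.length then PySem.List.pyGetD pos (-4) 0 else 0
    -- ''.join('#' if ch != '-' else ch for ch in tekst[:cut]) + tekst[cut:]
    String.ofList ((PySem.List.slice l none (some cut)).map (fun ch => if ch != '-' then '#' else ch)
      ++ PySem.List.slice l (some cut) none)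

-- ===== PRECONDITION & SPEC =====
def Spec_sakrij_znakove (tekst : String) (out : String) : Prop := out = sakrij_znakove_alt tekst
instance (tekst : String) (out : String) : Decidable (Spec_sakrij_znakove tekst out) := by unfold Spec_sakrij_znakove; infer_instance

-- ===== CLAIM (what is proved, stated in full; the proofs are below) =====
def Claim_equal_sakrij_znakove : Prop := ∀ (tekst : String), Dom_sakrij_znakove tekst → Spec_sakrij_znakove tekst (sakrij_znakove tekst)

-- ===== LEMMAS AND PROOFS =====

-- number of non-dash characters
def pvCnt (l : List Char) : Nat := l.countP (fun c => c != '-')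

-- the state machine of A's loop, output only
def pvMask (b : Int) : List Char → List Char
  | [] => []
  | c :: cs =>
    if c = '-' then c :: pvMask b cs
    else if b < 4 then c :: pvMask (b + 1) cs
    else '#' :: pvMask b cs

-- common specification: keep a non-dash character iff fewer than 4 non-dash chars follow it
def pvSpec (l : List Char) : List Char :=
  match l with
  | [] => []
  | c :: cs => (if c = '-' then c else if (pvCnt cs : Int) < 4 then c else '#') :: pvSpec cs

theorem pvCnt_cons (c : Char) (cs : List Char) :
    pvCnt (c :: cs) = if c = '-' then pvCnt cs else pvCnt cs + 1 := by
  by_cases h : c = '-' <;> simp [pvCnt, h]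

theorem foldA_eq (r : List Char) : ∀ (acc : List Char) (b : Int),
    (r.foldl pvStepA (acc, b)).1 = acc ++ pvMask b r := by
  induction r with
  | nil => intro acc b; simp [pvMask]
  | cons c cs ih =>
    intro acc b
    by_cases hc : c = '-'
    · simp [pvStepA, pvMask, hc, ih]
    · by_cases hb : b < 4
      · simp [pvStepA, pvMask, hc, hb, ih]
      · simp [pvStepA, pvMask, hc, hb, not_lt.mp hb, ih]

theorem pvMask_of_ge (l : List Char) : ∀ (b b' : Int), 4 ≤ b → 4 ≤ b' →
    pvMask b l = pvMask b' l := by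
  induction l with
  | nil => intro b b' _ _; rfl
  | cons c cs ih =>
    intro b b' hb hb'
    by_cases hc : c = '-'
    · simp [pvMask, hc, ih b b' hb hb']
    · simp [pvMask, hc, not_lt.mpr hb, not_lt.mpr hb', ih b b' hb hb']

theorem pvMask_dash (b : Int) (t : List Char) :
    pvMask b ('-' :: t) = '-' :: pvMask b t := by simp [pvMask]

theorem pvMask_cons_lt {c : Char} (hc : c ≠ '-') {b : Int} (hb : b < 4) (t : List Char) :
    pvMask b (c :: t) = c :: pvMask (b + 1) t := by simp [pvMask, hc, hb]

theorem pvMask_cons_ge {c : Char} (hc : c ≠ '-') {b : Int} (hb : ¬ b < 4) (t : List Char) :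
    pvMask b (c :: t) = '#' :: pvMask b t := by simp [pvMask, hc, hb]

theorem pvMask_append (xs : List Char) : ∀ (ys : List Char) (b : Int),
    pvMask b (xs ++ ys) = pvMask b xs ++ pvMask (min 4 (b + (pvCnt xs : Int))) ys := by
  induction xs with
  | nil =>
    intro ys b
    have h0 : (pvCnt ([] : List Char) : Int) = 0 := rfl
    rw [List.nil_append, h0]
    by_cases hb : b ≤ 4
    · have hm : min 4 (b + 0) = b := by omega
      rw [hm]; simp [pvMask]
    · have hm : min 4 (b + 0) = 4 := by omega
      rw [hm]
      simpa [pvMask] using pvMask_of_ge ys b 4 (by omega) (by omega)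
  | cons x xs ih =>
    intro ys b
    by_cases hx : x = '-'
    · subst hx
      have hcnt : (pvCnt ('-' :: xs) : Int) = (pvCnt xs : Int) := by
        rw [pvCnt_cons]; simp
      rw [List.cons_append, pvMask_dash, pvMask_dash, ih ys b, hcnt, List.cons_append]
    · have hcnt : (pvCnt (x :: xs) : Int) = (pvCnt xs : Int) + 1 := by
        rw [pvCnt_cons, if_neg hx]; push_cast; ring
      by_cases hb : b < 4
      · have hmin : min 4 (b + 1 + (pvCnt xs : Int)) = min 4 (b + (pvCnt (x :: xs) : Int)) := by
          rw [hcnt]; omega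
        rw [List.cons_append, pvMask_cons_lt hx hb, pvMask_cons_lt hx hb, ih ys (b + 1), hmin,
          List.cons_append]
      · have hmin : min 4 (b + (pvCnt xs : Int)) = min 4 (b + (pvCnt (x :: xs) : Int)) := by
          rw [hcnt]; omega
        rw [List.cons_append, pvMask_cons_ge hx hb, pvMask_cons_ge hx hb, ih ys b, hmin,
          List.cons_append]

theorem pvMask_reverse (l : List Char) :
    pvMask 0 l.reverse = (pvSpec l).reverse := by
  induction l with
  | nil => rfl
  | cons c cs ih =>
    have hcntrev : (pvCnt cs.reverse : Int) = (pvCnt cs : Int) := by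
      simp [pvCnt, List.countP_reverse]
    rw [List.reverse_cons, pvMask_append cs.reverse [c] 0, ih, hcntrev]
    by_cases hc : c = '-'
    · subst hc; simp [pvMask, pvSpec]
    · by_cases h4 : (pvCnt cs : Int) < 4
      · have hm : min 4 (0 + (pvCnt cs : Int)) = (pvCnt cs : Int) := by omega
        rw [hm, pvMask_cons_lt hc h4]
        simp [pvMask, pvSpec, hc, h4]
      · have hm : min 4 (0 + (pvCnt cs : Int)) = 4 := by omega
        rw [hm, pvMask_cons_ge hc (by omega)]
        simp [pvMask, pvSpec, hc, h4]

-- ===== B-side lemmas =====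

theorem pvPositions_cons (c : Char) (cs : List Char) (s : Int) :
    pvPositions (c :: cs) s =
      if c = '-' then pvPositions cs (s + 1) else s :: pvPositions cs (s + 1) := by
  by_cases hc : c = '-' <;> simp [pvPositions, PySem.List.enumerate_cons, hc]

theorem length_pvPositions (l : List Char) : ∀ (s : Int),
    (pvPositions l s).length = pvCnt l := by
  induction l with
  | nil => intro s; simp [pvPositions, pvCnt]
  | cons c cs ih =>
    intro s
    rw [pvPositions_cons, pvCnt_cons]
    by_cases hc : c = '-' <;> simp [hc, ih]

-- the element at index j of the position list: its value, and the non-dash count of the suffix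
theorem pvPositions_getElem (l : List Char) : ∀ (s : Int) (j : Nat),
    j < (pvPositions l s).length →
    ∃ n : Nat, n ≤ l.length ∧ (pvPositions l s)[j]? = some (s + (n : Int)) ∧
      pvCnt (l.drop n) = (pvPositions l s).length - j := by
  induction l with
  | nil => intro s j hj; simp [pvPositions] at hj
  | cons c cs ih =>
    intro s j hj
    by_cases hc : c = '-'
    · rw [pvPositions_cons, if_pos hc] at hj ⊢
      obtain ⟨n, hn, hget, hcnt⟩ := ih (s + 1) j hj
      refine ⟨n + 1, by simp; omega, ?_, ?_⟩
      · rw [hget]; congr 1; push_cast; ring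
      · simpa [List.drop_succ_cons, pvCnt_cons, hc] using hcnt
    · rw [pvPositions_cons, if_neg hc] at hj ⊢
      match j with
      | 0 =>
        refine ⟨0, by simp, by simp, ?_⟩
        simp [pvCnt_cons, hc, length_pvPositions]
      | j + 1 =>
        simp only [List.length_cons, Nat.add_lt_add_iff_right] at hj
        obtain ⟨n, hn, hget, hcnt⟩ := ih (s + 1) j hj
        refine ⟨n + 1, by simp; omega, ?_, ?_⟩
        · rw [List.getElem?_cons_succ, hget]; congr 1; push_cast; ring
        · simp only [List.drop_succ_cons, List.length_cons]
          rw [hcnt]; omega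

theorem pvSpec_of_le (l : List Char) (h : (pvCnt l : Int) ≤ 4) : pvSpec l = l := by
  induction l with
  | nil => rfl
  | cons c cs ih =>
    rw [pvCnt_cons] at h
    by_cases hc : c = '-'
    · rw [if_pos hc] at h
      simp [pvSpec, hc, ih h]
    · rw [if_neg hc] at h
      push_cast at h
      have h4 : (pvCnt cs : Int) < 4 := by omega
      have hle : (pvCnt cs : Int) ≤ 4 := by omega
      simp [pvSpec, hc, h4, ih hle]

theorem pvSpec_append_of_ge (xs : List Char) (ys : List Char) (h : 4 ≤ (pvCnt ys : Int)) :
    pvSpec (xs ++ ys) = xs.map (fun ch => if ch != '-' then '#' else ch) ++ pvSpec ys := by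
  induction xs with
  | nil => simp
  | cons c cs ih =>
    have hcnt : (pvCnt (cs ++ ys) : Int) = (pvCnt cs : Int) + (pvCnt ys : Int) := by
      simp [pvCnt, List.countP_append]
    by_cases hc : c = '-'
    · simp [pvSpec, hc, ih]
    · have h4 : ¬ (pvCnt (cs ++ ys) : Int) < 4 := by
        rw [hcnt]; omega
      simp [pvSpec, hc, h4, ih]

-- ===== VERDICT (by name: the statement is the Claim_ definition above) =====
theorem sakrij_znakove_spec : Claim_equal_sakrij_znakove := by
  intro tekst _
  unfold Spec_sakrij_znakove sakrij_znakove sakrij_znakove_alt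
  by_cases hlen : PySem.Str.len tekst ≤ 5
  · rw [if_pos hlen, if_pos hlen]
  · rw [if_neg hlen, if_neg hlen]
    set l := tekst.toList with hl
    have hA : ((l.reverse).foldl pvStepA ([], 0)).1.reverse = pvSpec l := by
      rw [foldA_eq l.reverse [] 0, List.nil_append, pvMask_reverse, List.reverse_reverse]
    rw [hA]
    congr 1
    by_cases hpos : 4 ≤ (pvPositions l 0).length
    · -- cut = pos[-4]
      obtain ⟨n, hn, hget, hcnt⟩ :=
        pvPositions_getElem l 0 ((pvPositions l 0).length - 4) (by omega)
      have hcnt4 : pvCnt (l.drop n) = 4 := by rw [hcnt]; omega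
      have hgetD : PySem.List.pyGetD (pvPositions l 0) (-4) 0 = (n : Int) := by
        simp only [PySem.List.pyGetD, PySem.List.pyGet?, PySem.List.pyIdx?]
        split
        · omega
        · split
          · simp [hget]
          · omega
      rw [if_pos hpos, hgetD, PySem.List.slice_to _ (by positivity),
        PySem.List.slice_from _ (by positivity), Int.toNat_natCast]
      have hsplit : pvSpec l = pvSpec (l.take n ++ l.drop n) := by rw [List.take_append_drop]
      rw [hsplit, pvSpec_append_of_ge _ _ (by rw [hcnt4]; norm_num),
        pvSpec_of_le _ (by rw [hcnt4]; norm_num)]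
    · -- fewer than 4 non-dash characters: cut = 0, nothing is masked
      have hle : (pvCnt l : Int) ≤ 4 := by
        have := length_pvPositions l 0
        omega
      rw [if_neg hpos]
      simp [PySem.List.slice_to, pvSpec_of_le l hle]
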